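-- pv_equiv track=rewrite | github.com/christianebacani/Roadmap | Coding Challenges using Python and SQL/Code Wars Python Solved Problems/7 Kyu/zero-balanced_array.py | is_zero_balanced
-- ===== SOURCE A (Python) =====
-- def is_zero_balanced(arr: list[int]) -> bool:
--     if sum(arr) != 0 or arr == []:
--         return False
--
--     for i in range(len(arr)):
--         if arr[i] == 0:
--             continue
--
--         if arr[i] * -1 not in arr:
--             return False
--
--     return True
-- ===== SOURCE B (Python) =====
-- def is_zero_balanced(arr: list[int]) -> bool:
--     # Sort the distinct values; the set of values is closed under negation
--     # iff this strictly increasing list is an anti-palindrome (ds[i] == -ds[j]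
--     # from both ends inward), checked by a two-pointer scan.
--     if not arr or sum(arr) != 0:
--         return False
--     ds = sorted(set(arr))
--     i, j = 0, len(ds) - 1
--     while i <= j:
--         if ds[i] != -ds[j]:
--             return False
--         i += 1
--         j -= 1
--     return True
-- ===== Notes on version B (the rewrite author's own statement) =====
-- stated objective: alternative
-- what changed: Replaces A's per-index membership scans by sorting the distinct values and running a two-pointer scan from both ends, using that a finite set is closed under negation iff its sorted enumeration is an anti-palindrome (ds[i] == -ds[n-1-i]).
import Mathlib
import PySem

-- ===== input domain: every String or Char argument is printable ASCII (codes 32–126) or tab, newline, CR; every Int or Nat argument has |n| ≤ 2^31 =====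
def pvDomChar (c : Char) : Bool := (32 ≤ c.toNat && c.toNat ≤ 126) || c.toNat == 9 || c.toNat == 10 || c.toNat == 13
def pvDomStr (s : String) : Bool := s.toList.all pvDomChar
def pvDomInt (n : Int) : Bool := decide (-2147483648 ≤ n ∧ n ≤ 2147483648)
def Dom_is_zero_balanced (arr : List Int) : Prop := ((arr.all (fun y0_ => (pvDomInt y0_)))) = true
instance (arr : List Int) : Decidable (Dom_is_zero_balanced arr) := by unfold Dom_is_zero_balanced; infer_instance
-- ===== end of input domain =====

-- B sorts the distinct values and checks ds[i] == -ds[n-1-i] with a two-pointer scan (alternative algorithm).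

-- ===== PORT A =====
-- the for-loop over range(len(arr)) with its continue / early return False
def izbLoop (arr : List Int) : List Nat → Bool
  | [] => true
  | i :: rest =>
    let v := PySem.List.pyGetD arr (i : Int) 0   -- arr[i]; i ∈ range(len(arr)) is always in range
    if v = 0 then izbLoop arr rest
    else if (v * -1) ∈ arr then izbLoop arr rest
    else false

def is_zero_balanced (arr : List Int) : Bool :=
  if arr.sum ≠ 0 ∨ arr = [] then false
  else izbLoop arr (List.range arr.length)

-- ===== PORT B =====
-- the while i <= j loop; i, j kept as Nat: j-1 clamps at 0 where Python reaches -1,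
-- but there i has just become ≥ 1 > j, so both loops exit identically (faithful on every input)
def izbTwoPtr (ds : List Int) (i j : Nat) : Bool :=
  if i ≤ j then
    if ds.getD i 0 ≠ -(ds.getD j 0) then false   -- ds[i], ds[j]; in range whenever reached
    else izbTwoPtr ds (i + 1) (j - 1)
  else true
termination_by j + 1 - i
decreasing_by omega

def is_zero_balanced_alt (arr : List Int) : Bool :=
  if arr = [] ∨ arr.sum ≠ 0 then false
  else
    let ds := PySem.List.sorted (PySem.Set.ofList arr) (fun x => x) false
    izbTwoPtr ds 0 (ds.length - 1)

-- ===== PRECONDITION & SPEC =====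
def Spec_is_zero_balanced (arr : List Int) (out : Bool) : Prop := out = is_zero_balanced_alt arr
instance (arr : List Int) (out : Bool) : Decidable (Spec_is_zero_balanced arr out) := by unfold Spec_is_zero_balanced; infer_instance

-- ===== CLAIM (what is proved, stated in full; the proofs are below) =====
def Claim_equal_is_zero_balanced : Prop := ∀ (arr : List Int), Dom_is_zero_balanced arr → Spec_is_zero_balanced arr (is_zero_balanced arr)

-- ===== LEMMAS AND PROOFS =====

theorem izbLoop_eq_decide (arr : List Int) (idxs : List Nat) :
    izbLoop arr idxs
      = decide (∀ i ∈ idxs, PySem.List.pyGetD arr (i : Int) 0 = 0 ∨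
          (PySem.List.pyGetD arr (i : Int) 0) * -1 ∈ arr) := by
  induction idxs with
  | nil => simp [izbLoop]
  | cons i rest ih =>
    simp only [izbLoop, ih]
    split_ifs with h1 h2
    · simp at h1
      simp [h1]
    · simp at h1 h2
      simp [h1, h2]
    · simp at h1 h2
      simp [h1, h2]

theorem forall_range_getD (arr : List Int) (P : Int → Prop) :
    (∀ i ∈ List.range arr.length, P (PySem.List.pyGetD arr (i : Int) 0)) ↔ (∀ x ∈ arr, P x) := by
  constructor
  · intro h x hx
    obtain ⟨i, hi, rfl⟩ := List.mem_iff_getElem.mp hx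
    have := h i (List.mem_range.mpr hi)
    rwa [PySem.List.pyGetD_natCast, List.getD_eq_getElem arr 0 hi] at this
  · intro h i hi
    have hi' := List.mem_range.mp hi
    rw [PySem.List.pyGetD_natCast, List.getD_eq_getElem arr 0 hi']
    exact h _ (List.getElem_mem hi')

-- A's value = nonempty ∧ zero sum ∧ closure under negation
theorem izb_A_iff (arr : List Int) :
    is_zero_balanced arr = true ↔ (arr ≠ [] ∧ arr.sum = 0 ∧ ∀ x ∈ arr, -x ∈ arr) := by
  unfold is_zero_balanced
  split_ifs with h
  · simp only [false_iff]
    rintro ⟨hne, hs, -⟩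
    rcases h with h | h
    · exact h hs
    · exact hne h
  · push_neg at h
    rw [izbLoop_eq_decide, decide_eq_true_iff,
        forall_range_getD arr (fun v => v = 0 ∨ v * -1 ∈ arr)]
    constructor
    · intro hcl
      refine ⟨h.2, h.1, fun x hx => ?_⟩
      rcases hcl x hx with h0 | hm
      · simpa [h0] using hx
      · simpa using hm
    · rintro ⟨-, -, hcl⟩ x hx
      right; simpa using hcl x hx

-- the two-pointer loop checks exactly the pairs (k, i+j-k)
theorem izbTwoPtr_iff (ds : List Int) (i j : Nat) :
    izbTwoPtr ds i j = true
      ↔ ∀ k, i ≤ k → 2 * k ≤ i + j → ds.getD k 0 = -(ds.getD (i + j - k) 0) := by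
  fun_induction izbTwoPtr ds i j with
  | case1 i j hij hne =>
    simp only [Bool.false_eq_true, false_iff]
    intro h
    refine hne ?_
    have := h i (le_refl i) (by omega)
    rwa [show i + j - i = j by omega] at this
  | case2 i j hij hne ih =>
    have heq : ds.getD i 0 = -(ds.getD j 0) := by
      by_contra hc; exact hne (by simpa using hc)
    by_cases hj0 : j = 0
    · -- i = j = 0: the recursive call starts with i+1 > j-1 and is trivially true
      subst hj0
      have hi0 : i = 0 := Nat.le_zero.mp hij
      subst hi0
      rw [izbTwoPtr, if_neg (by omega)]
      simp only [true_iff]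
      intro k hk h2k
      have hk0 : k = 0 := by omega
      subst hk0; simpa using heq
    · rw [ih]
      constructor
      · intro h k hk h2k
        rcases Nat.eq_or_lt_of_le hk with rfl | hlt
        · rw [show i + j - i = j by omega]; exact heq
        · have := h k (by omega) (by omega)
          rwa [show i + 1 + (j - 1) = i + j by omega] at this
      · intro h k hk h2k
        rw [show i + 1 + (j - 1) = i + j by omega] at h2k ⊢
        exact h k (by omega) h2k
  | case3 i j hij =>
    simp only [true_iff]
    intro k hk h2k; omega

-- for a strictly increasing list, the anti-palindrome pair check ↔ closure under negation
theorem pairs_iff_neg_closed (ds : List Int) (hlt : ds.Pairwise (· < ·)) :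
    (∀ k, 2 * k ≤ ds.length - 1 → ds.getD k 0 = -(ds.getD (ds.length - 1 - k) 0))
      ↔ (∀ x ∈ ds, -x ∈ ds) := by
  constructor
  · intro h x hx
    obtain ⟨m, hm, rfl⟩ := List.mem_iff_getElem.mp hx
    by_cases h2m : 2 * m ≤ ds.length - 1
    · have := h m h2m
      rw [List.getD_eq_getElem ds 0 hm, List.getD_eq_getElem ds 0 (by omega)] at this
      rw [this, neg_neg]
      exact List.getElem_mem _
    · set k := ds.length - 1 - m with hk
      have h2k : 2 * k ≤ ds.length - 1 := by omega
      have := h k h2k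
      have hmk : ds.length - 1 - k = m := by omega
      rw [hmk, List.getD_eq_getElem ds 0 (by omega), List.getD_eq_getElem ds 0 hm] at this
      rw [← this]
      exact List.getElem_mem _
  · intro hcl
    -- ds and (ds.map Neg.neg).reverse are strictly sorted with the same members, hence equal
    have hnodup : ds.Nodup := hlt.imp ne_of_lt
    set ds' := (ds.map (fun x => -x)).reverse with hds'
    have hlt' : ds'.Pairwise (· < ·) := by
      rw [hds', List.pairwise_reverse]
      exact (List.pairwise_map.mpr (hlt.imp (fun h => by omega)))
    have hmem : ∀ x, x ∈ ds' ↔ x ∈ ds := by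
      intro x
      rw [hds', List.mem_reverse, List.mem_map]
      constructor
      · rintro ⟨y, hy, rfl⟩; exact hcl y hy
      · intro hx; exact ⟨-x, hcl x hx, by ring⟩
    have hperm : ds'.Perm ds := by
      apply List.perm_of_nodup_nodup_toFinset_eq (hlt'.imp ne_of_lt) hnodup
      ext x
      simp [List.mem_toFinset, hmem]
    have heq : ds = ds' := by
      haveI : Std.Antisymm (fun (a b : Int) => a < b) :=
        ⟨fun a b h1 h2 => absurd h2 (lt_asymm h1)⟩
      exact (List.Perm.eq_of_pairwise' hlt' hlt hperm).symm
    intro k h2k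
    rcases Nat.eq_zero_or_pos ds.length with h0 | h0
    · have hnil : ds = [] := List.eq_nil_of_length_eq_zero h0
      simp [hnil]
    · have hk : k < ds.length := by omega
      have hk' : ds.length - 1 - k < ds.length := by omega
      have hlen' : ds'.length = ds.length := by simp [hds']
      have h1 : ds.getD k 0 = ds'.getD k 0 := by rw [← heq]
      rw [h1, List.getD_eq_getElem ds' 0 (by omega), List.getD_eq_getElem ds 0 hk']
      simp only [hds', List.getElem_reverse, List.getElem_map, List.length_map]

-- ===== VERDICT (by name: the statement is the Claim_ definition above) =====
theorem is_zero_balanced_spec : Claim_equal_is_zero_balanced := by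
  intro arr _
  unfold Spec_is_zero_balanced
  rw [Bool.eq_iff_iff, izb_A_iff]
  unfold is_zero_balanced_alt
  split_ifs with h
  · simp only [iff_false]
    rintro ⟨hne, hs, -⟩
    rcases h with h | h
    · exact hne h
    · exact h hs
  · push_neg at h
    set ds := PySem.List.sorted (PySem.Set.ofList arr) (fun x => x) false with hds
    have hlt : ds.Pairwise (· < ·) := PySem.List.sorted_ofList_pairwise_lt arr
    have hmem : ∀ x, x ∈ ds ↔ x ∈ arr := by
      intro x
      rw [hds, PySem.List.mem_sorted, PySem.Set.mem_ofList]
    rw [izbTwoPtr_iff]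
    simp only [Nat.zero_add, Nat.zero_le, true_implies]
    rw [pairs_iff_neg_closed ds hlt]
    constructor
    · rintro ⟨-, -, hcl⟩ x hx
      exact (hmem (-x)).mpr (hcl x ((hmem x).mp hx))
    · intro hcl
      exact ⟨h.1, h.2, fun x hx => (hmem (-x)).mp (hcl x ((hmem x).mpr hx))⟩
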